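-- pv_equiv track=rewrite | github.com/Hulk89/myTrainingSources | AlgoSpot/Poly/Poly.py | poly2
-- ===== SOURCE A (Python) =====
-- def case( n, m ):
--     result = n + m - 1
--     return result
--
-- def poly( n, firstBlock ):
--     if n == firstBlock:
--         return 1
--     else:
--         sum = 0
--         for dd in range( 1, n - firstBlock + 1 ):
--             tmp = poly( n - firstBlock, dd )
--             sum = sum + ( tmp * case( dd, firstBlock ) );
--         return sum
--
-- def poly2( n ):
--     sum = 0
--     for myBlock in range( 1, n ):
--         m = n - myBlock
--         for firstBlock in range( 1, m + 1 ):
--             tmp = poly( m, firstBlock )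
--             sum = sum + ( tmp * case ( myBlock, firstBlock ) );
--     sum = sum + 1;
--     return sum
-- ===== SOURCE B (Python) =====
-- def poly2(n):
--     # Bottom-up DP: rows[m-1][f-1] = number of polyominoes of m cells whose first row has f cells.
--     if n <= 1:
--         return 1
--     rows = []
--     for m in range(1, n):
--         row = []
--         for f in range(1, m + 1):
--             if f == m:
--                 row.append(1)
--             else:
--                 prev = rows[m - f - 1]
--                 s = 0
--                 for dd in range(1, m - f + 1):
--                     s += prev[dd - 1] * (dd + f - 1)
--                 row.append(s)
--         rows.append(row)
--     total = 1
--     for m in range(1, n):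
--         row = rows[m - 1]
--         for f in range(1, m + 1):
--             total += row[f - 1] * (n - m + f - 1)
--     return total
-- ===== Notes on version B (the rewrite author's own statement) =====
-- stated objective: faster
-- what changed: A's exponentially recomputing recursion poly(n, firstBlock) is replaced by a bottom-up dynamic-programming table whose row m holds the counts for all first-block sizes of an m-cell piece, so each value is computed once; intended as faster (the probe saw A time out at sizes where B returned at once) but it could not confirm a ratio.
import Mathlib
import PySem

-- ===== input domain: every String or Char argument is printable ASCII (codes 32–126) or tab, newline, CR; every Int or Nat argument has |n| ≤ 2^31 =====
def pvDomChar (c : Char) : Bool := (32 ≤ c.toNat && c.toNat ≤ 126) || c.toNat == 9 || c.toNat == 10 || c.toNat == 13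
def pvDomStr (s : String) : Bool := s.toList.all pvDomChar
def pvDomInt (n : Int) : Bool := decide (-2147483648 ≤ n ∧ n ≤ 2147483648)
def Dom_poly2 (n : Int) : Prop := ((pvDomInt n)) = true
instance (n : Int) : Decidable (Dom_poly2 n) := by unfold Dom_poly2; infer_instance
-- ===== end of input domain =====

-- B replaces A's recursive recomputation by a bottom-up dynamic-programming table (intended as faster; a timing run saw A time out where B returned but could not measure a ratio); return values agree wherever A returns.

-- ===== PORT A =====
def pvCase (n m : Int) : Int := n + m - 1

def pvPoly (n firstBlock : Int) : Int :=
  if n = firstBlock then 1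
  else
    (PySem.List.pyRange 1 (n - firstBlock + 1) 1).attach.foldl
      (fun s dd => s + pvPoly (n - firstBlock) dd.1 * pvCase dd.1 firstBlock) 0
termination_by (if firstBlock ≤ 0 then 2 * (n - firstBlock) + 1 else 2 * n).toNat
decreasing_by
  have h := PySem.List.mem_pyRange_one.mp dd.2
  split_ifs with h1 h2 <;> omega

def poly2 (n : Int) : Int :=
  ((PySem.List.pyRange 1 n 1).foldl
    (fun s myBlock =>
      let m := n - myBlock
      (PySem.List.pyRange 1 (m + 1) 1).foldl
        (fun s2 firstBlock => s2 + pvPoly m firstBlock * pvCase myBlock firstBlock) s)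
    0) + 1

-- ===== PORT B =====
def polyAltRow (rows : List (List Int)) (m : Int) : List Int :=
  (PySem.List.pyRange 1 (m + 1) 1).foldl
    (fun row f =>
      if f = m then row ++ [1]
      else
        let prev := PySem.List.pyGetD rows (m - f - 1) []
        let s := (PySem.List.pyRange 1 (m - f + 1) 1).foldl
          (fun s dd => s + PySem.List.pyGetD prev (dd - 1) 0 * (dd + f - 1)) 0
        row ++ [s])
    []

def poly2_alt (n : Int) : Int :=
  if n ≤ 1 then 1
  else
    let rows := (PySem.List.pyRange 1 n 1).foldl (fun rows m => rows ++ [polyAltRow rows m]) []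
    (PySem.List.pyRange 1 n 1).foldl
      (fun total m =>
        let row := PySem.List.pyGetD rows (m - 1) []
        (PySem.List.pyRange 1 (m + 1) 1).foldl
          (fun t f => t + PySem.List.pyGetD row (f - 1) 0 * (n - m + f - 1)) total)
      1

-- ===== PRECONDITION & SPEC =====
-- Pre_ excludes only the inputs on which Python A raises: for large n the recursion poly(n-1, 1)
-- descends about n frames and exceeds CPython's default recursion limit, raising RecursionError.
def Pre_poly2 (n : Int) : Prop := n < 998
instance (n : Int) : Decidable (Pre_poly2 n) := by unfold Pre_poly2; infer_instance
def pvWitness_poly2 : Int := (6)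

def Spec_poly2 (n : Int) (out : Int) : Prop := out = poly2_alt n
instance (n : Int) (out : Int) : Decidable (Spec_poly2 n out) := by unfold Spec_poly2; infer_instance

-- ===== CLAIM (what is proved, stated in full; the proofs are below) =====
def Claim_equal_poly2 : Prop := ∀ (n : Int), Dom_poly2 n → Pre_poly2 n → Spec_poly2 n (poly2 n)

-- ===== LEMMAS AND PROOFS =====

-- the ideal row of DP values: entry f-1 holds pvPoly m f
def pvRowFor (m : Int) : List Int :=
  (PySem.List.pyRange 1 (m + 1) 1).map (fun f => pvPoly m f)

theorem pvPoly_self (m : Int) : pvPoly m m = 1 := by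
  rw [pvPoly]; simp

theorem pvPoly_of_ne (m f : Int) (h : m ≠ f) :
    pvPoly m f = (PySem.List.pyRange 1 (m - f + 1) 1).foldl
      (fun s dd => s + pvPoly (m - f) dd * (dd + f - 1)) 0 := by
  rw [pvPoly]
  simp [h, pvCase]

-- lookup in an ideal row
theorem pvRowFor_get (m f : Int) (h1 : 1 ≤ f) (h2 : f ≤ m) :
    PySem.List.pyGetD (pvRowFor m) (f - 1) 0 = pvPoly m f := by
  unfold pvRowFor
  have hk : f - 1 = ((f - 1).toNat : Int) := by omega
  rw [hk, PySem.List.pyGetD_map_pyRange_one _ _ _ _ _ (by omega)]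
  congr 1
  omega

-- lookup of a row in the ideal rows list
theorem pvRows_get (N m : Int) (h1 : 1 ≤ m) (h2 : m < N) :
    PySem.List.pyGetD ((PySem.List.pyRange 1 N 1).map pvRowFor) (m - 1) [] = pvRowFor m := by
  have hk : m - 1 = ((m - 1).toNat : Int) := by omega
  rw [hk, PySem.List.pyGetD_map_pyRange_one _ _ _ _ _ (by omega)]
  congr 1
  omega

-- the row built by B from correct previous rows is the ideal row
theorem polyAltRow_correct (m : Int) (hm : 1 ≤ m) :
    polyAltRow ((PySem.List.pyRange 1 m 1).map pvRowFor) m = pvRowFor m := by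
  unfold polyAltRow
  have hfun : (fun (row : List Int) f =>
      if f = m then row ++ [1]
      else
        let prev := PySem.List.pyGetD ((PySem.List.pyRange 1 m 1).map pvRowFor) (m - f - 1) []
        let s := (PySem.List.pyRange 1 (m - f + 1) 1).foldl
          (fun s dd => s + PySem.List.pyGetD prev (dd - 1) 0 * (dd + f - 1)) 0
        row ++ [s])
      = fun (row : List Int) f => row ++
        [if f = m then 1
         else (PySem.List.pyRange 1 (m - f + 1) 1).foldl
          (fun s dd => s + PySem.List.pyGetD
            (PySem.List.pyGetD ((PySem.List.pyRange 1 m 1).map pvRowFor) (m - f - 1) [])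
            (dd - 1) 0 * (dd + f - 1)) 0] := by
    funext row f
    split_ifs <;> rfl
  rw [hfun, PySem.List.foldl_append_singleton_eq_map]
  conv_rhs => rw [pvRowFor]
  rw [List.nil_append]
  apply List.map_congr_left
  intro f hf
  have hf' := PySem.List.mem_pyRange_one.mp hf
  by_cases hfm : f = m
  · simp [hfm, pvPoly_self]
  · simp only [if_neg hfm]
    have hprev : PySem.List.pyGetD ((PySem.List.pyRange 1 m 1).map pvRowFor) (m - f - 1) []
        = pvRowFor (m - f) := by
      have hk : m - f - 1 = ((m - f - 1).toNat : Int) := by omega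
      rw [hk, PySem.List.pyGetD_map_pyRange_one _ _ _ _ _ (by omega)]
      congr 1
      omega
    rw [hprev, pvPoly_of_ne m f (by omega)]
    apply PySem.List.foldl_congr_mem
    intro s dd hdd
    have hdd' := PySem.List.mem_pyRange_one.mp hdd
    rw [pvRowFor_get (m - f) dd (by omega) (by omega)]

-- the rows loop builds exactly the ideal rows
theorem pvRows_eq (N : Int) :
    (PySem.List.pyRange 1 N 1).foldl (fun rows m => rows ++ [polyAltRow rows m]) []
      = (PySem.List.pyRange 1 N 1).map pvRowFor := by
  by_cases hN : N ≤ 1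
  · rw [PySem.List.pyRange_one_eq_nil hN]; rfl
  · obtain ⟨k, hk⟩ : ∃ k : Nat, N = 1 + (k : Int) := ⟨(N - 1).toNat, by omega⟩
    subst hk
    induction k with
    | zero => rw [PySem.List.pyRange_one_eq_nil (by omega)]; rfl
    | succ j ih =>
      have hsplit : (1 : Int) + (↑(j + 1) : Int) = (1 + (j : Int)) + 1 := by push_cast; omega
      rw [hsplit, PySem.List.pyRange_one_succ_right (by omega), List.foldl_append, List.map_append]
      by_cases hj : (0 : Nat) < j
      · rw [ih (by omega)]
        simp only [List.foldl_cons, List.foldl_nil, List.map_cons, List.map_nil]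
        rw [polyAltRow_correct _ (by omega)]
      · have hj0 : j = 0 := by omega
        subst hj0
        rw [PySem.List.pyRange_one_eq_nil (by omega)]
        simp only [List.foldl_nil, List.map_nil, List.nil_append, List.foldl_cons,
          List.foldl_nil, List.map_cons]
        norm_num
        have : ((PySem.List.pyRange 1 1 1).map pvRowFor) = [] := by
          rw [PySem.List.pyRange_one_eq_nil (by omega)]; rfl
        rw [← this, polyAltRow_correct _ (by omega)]

-- the inner weighted sum both programs compute for a given sub-size m (weight written via n and m)
def pvT (n m : Int) : Int :=
  ((PySem.List.pyRange 1 (m + 1) 1).map (fun f => pvPoly m f * (n - m + f - 1))).sum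

theorem poly2_eq_sum (n : Int) :
    poly2 n = ((PySem.List.pyRange 1 n 1).map (fun b => pvT n (n - b))).sum + 1 := by
  unfold poly2
  congr 1
  have hstep : ∀ (s b : Int),
      (PySem.List.pyRange 1 (n - b + 1) 1).foldl
        (fun s2 f => s2 + pvPoly (n - b) f * pvCase b f) s = s + pvT n (n - b) := by
    intro s b
    rw [PySem.List.foldl_add (PySem.List.pyRange 1 (n - b + 1) 1)
      (fun f => pvPoly (n - b) f * pvCase b f) s]
    unfold pvT pvCase
    congr 1
    refine congrArg (fun l : List Int => l.sum) (List.map_congr_left ?_)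
    intro f _
    ring_nf
  calc (PySem.List.pyRange 1 n 1).foldl
        (fun s b => (PySem.List.pyRange 1 (n - b + 1) 1).foldl
          (fun s2 f => s2 + pvPoly (n - b) f * pvCase b f) s) 0
      = (PySem.List.pyRange 1 n 1).foldl (fun s b => s + pvT n (n - b)) 0 := by
        apply PySem.List.foldl_congr_mem
        intro s b _
        exact hstep s b
    _ = ((PySem.List.pyRange 1 n 1).map (fun b => pvT n (n - b))).sum := by
        rw [PySem.List.foldl_add (PySem.List.pyRange 1 n 1) (fun b => pvT n (n - b)) 0]; ring

theorem poly2_alt_eq_sum (n : Int) (hn : ¬ n ≤ 1) :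
    poly2_alt n = ((PySem.List.pyRange 1 n 1).map (fun m => pvT n m)).sum + 1 := by
  unfold poly2_alt
  rw [if_neg hn]
  simp only [pvRows_eq n]
  calc (PySem.List.pyRange 1 n 1).foldl
        (fun total m =>
          (PySem.List.pyRange 1 (m + 1) 1).foldl
            (fun t f => t + PySem.List.pyGetD
              (PySem.List.pyGetD ((PySem.List.pyRange 1 n 1).map pvRowFor) (m - 1) []) (f - 1) 0
              * (n - m + f - 1)) total) 1
      = (PySem.List.pyRange 1 n 1).foldl (fun total m => total + pvT n m) 1 := by
        apply PySem.List.foldl_congr_mem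
        intro total m hm
        have hm' := PySem.List.mem_pyRange_one.mp hm
        rw [pvRows_get n m (by omega) (by omega),
          PySem.List.foldl_add (PySem.List.pyRange 1 (m + 1) 1)
            (fun f => PySem.List.pyGetD (pvRowFor m) (f - 1) 0 * (n - m + f - 1)) total]
        unfold pvT
        congr 1
        refine congrArg (fun l : List Int => l.sum) (List.map_congr_left ?_)
        intro f hf
        have hf' := PySem.List.mem_pyRange_one.mp hf
        rw [pvRowFor_get m f (by omega) (by omega)]
    _ = ((PySem.List.pyRange 1 n 1).map (fun m => pvT n m)).sum + 1 := by
        rw [PySem.List.foldl_add (PySem.List.pyRange 1 n 1) (fun m => pvT n m) 1]; ring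

-- summing g over range k in reflected order gives the same sum
theorem pv_sum_reflect_gen (k : Nat) (g : Nat → Int) :
    ((List.range k).map (fun i => g (k - 1 - i))).sum = ((List.range k).map g).sum := by
  have h1 : ((List.range k).map (fun i => g (k - 1 - i))).sum
      = ∑ i ∈ Finset.range k, g (k - 1 - i) := rfl
  have h2 : ((List.range k).map g).sum = ∑ i ∈ Finset.range k, g i := rfl
  rw [h1, h2, Finset.sum_range_reflect]

-- reversing the summation order does not change the sum
theorem pvSum_reflect (n : Int) :
    ((PySem.List.pyRange 1 n 1).map (fun b => pvT n (n - b))).sum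
      = ((PySem.List.pyRange 1 n 1).map (fun m => pvT n m)).sum := by
  rw [PySem.List.pyRange_one, List.map_map, List.map_map]
  set k := (n - 1).toNat with hk
  calc ((List.range k).map ((fun b => pvT n (n - b)) ∘ fun j : Nat => 1 + (j : Int))).sum
      = ((List.range k).map (fun i : Nat =>
          ((fun m => pvT n m) ∘ fun j : Nat => 1 + (j : Int)) (k - 1 - i))).sum := by
        refine congrArg List.sum (List.map_congr_left ?_)
        intro i hi
        have hik := List.mem_range.mp hi
        simp only [Function.comp]
        congr 1
        have hks : ((k - 1 - i : Nat) : Int) = (k : Int) - 1 - (i : Int) := by omega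
        omega
    _ = ((List.range k).map ((fun m => pvT n m) ∘ fun j : Nat => 1 + (j : Int))).sum :=
        pv_sum_reflect_gen k _

-- ===== VERDICT (by name: the statement is the Claim_ definition above) =====
theorem poly2_spec : Claim_equal_poly2 := by
  intro n _ _
  unfold Spec_poly2
  by_cases hn : n ≤ 1
  · unfold poly2 poly2_alt
    rw [if_pos hn, PySem.List.pyRange_one_eq_nil hn]
    rfl
  · rw [poly2_eq_sum, poly2_alt_eq_sum n hn, pvSum_reflect]
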